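-- pv_equiv track=rewrite | github.com/micaelgomes/PE-Activities | 8_atividade/type_states.py | transiente
-- ===== SOURCE A (Python) =====
-- def func_acc(mat, visit, start, end):
--     path = 0
--
--     if mat[start][end] > 0:
--         return 1
--
--     elif not start in visit:
--         visit.append(start)
--
--         for j in range(len(mat[start])):
--             if mat[start][j] > 0:
--                 path += func_acc(mat, visit, j, end)
--
--     return path
--
-- def transiente(mat):
--     out = []
--
--     for i in range(len(mat)):
--         for j in range(len(mat[i])):
--             if i != j and mat[i][j] > 0 and not func_acc(mat, [], j, i):
--                 if not i in out:
--                     out.append(i)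
--
--     return out
-- ===== SOURCE B (Python) =====
-- def transiente(mat):
--     n = len(mat)
--     reach = [[mat[i][j] > 0 for j in range(n)] for i in range(n)]
--     for k in range(n):
--         reach = [[reach[i][j] or (reach[i][k] and reach[k][j]) for j in range(n)] for i in range(n)]
--     return [i for i in range(n)
--             if any(j != i and mat[i][j] > 0 and not reach[j][i] for j in range(n))]
-- ===== Notes on version B (the rewrite author's own statement) =====
-- stated objective: faster
-- what changed: A answers each edge (i,j) with a fresh recursive DFS (func_acc) over the whole graph; B computes the transitive closure once with Floyd-Warshall and then decides every edge by a single table lookup.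
-- outside the precondition, e.g. on transiente([[-1], [-2, -3]]): A returns [], B raises IndexError
import Mathlib
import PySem

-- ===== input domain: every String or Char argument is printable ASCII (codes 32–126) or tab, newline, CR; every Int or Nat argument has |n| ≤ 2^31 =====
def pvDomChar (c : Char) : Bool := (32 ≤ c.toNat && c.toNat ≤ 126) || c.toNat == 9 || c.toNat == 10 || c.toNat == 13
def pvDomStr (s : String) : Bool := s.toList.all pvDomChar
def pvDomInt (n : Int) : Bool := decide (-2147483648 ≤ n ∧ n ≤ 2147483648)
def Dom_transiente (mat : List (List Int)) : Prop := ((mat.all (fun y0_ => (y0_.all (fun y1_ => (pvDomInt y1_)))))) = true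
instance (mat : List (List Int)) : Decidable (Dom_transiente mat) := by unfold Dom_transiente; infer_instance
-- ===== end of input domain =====

-- B replaces A's per-edge recursive DFS reachability queries by one Floyd–Warshall
-- transitive closure followed by a single scan of the edges (objective: faster).

-- ===== PORT A =====
-- Literal port of A's `func_acc`. Python's `visit` list is mutated in place and shared
-- across the recursive calls, so it is threaded through as part of the result.
-- All indices are nonnegative, so element access is `getD`; out-of-range access
-- (Python IndexError on a non-square `mat`) is excluded by Pre_transiente.
-- Python's unbounded recursion is ported with fuel `mat.length + 1`, which the lemmas
-- below show is never exhausted on square matrices (each nested call visits a new node).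
def funcAcc (mat : List (List Int)) : Nat → List Nat → Nat → Nat → Int × List Nat
  | 0, visit, _, _ => (0, visit)
  | fuel + 1, visit, start, stop =>
    if 0 < (mat.getD start []).getD stop 0 then (1, visit)
    else if start ∈ visit then (0, visit)
    else
      (List.range (mat.getD start []).length).foldl
        (fun acc j =>
          if 0 < (mat.getD start []).getD j 0 then
            let r := funcAcc mat fuel acc.2 j stop
            (acc.1 + r.1, r.2)
          else acc)
        (0, visit ++ [start])

def transiente (mat : List (List Int)) : List Int :=
  (List.range mat.length).foldl
    (fun out i =>
      (List.range (mat.getD i []).length).foldl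
        (fun out j =>
          if i ≠ j ∧ 0 < (mat.getD i []).getD j 0 ∧
              (funcAcc mat (mat.length + 1) [] j i).1 = 0 then
            if (i : Int) ∈ out then out else out ++ [(i : Int)]
          else out)
        out)
    []

-- ===== PORT B =====
-- Port of Source B: boolean adjacency matrix, Floyd–Warshall closure (a fresh matrix per
-- round k, exactly as the list comprehension in Source B builds one), then one edge scan.
def fwInit (mat : List (List Int)) : List (List Bool) :=
  (List.range mat.length).map fun i =>
    (List.range mat.length).map fun j => decide (0 < (mat.getD i []).getD j 0)

def fwStep (mat : List (List Int)) (R : List (List Bool)) (k : Nat) : List (List Bool) :=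
  (List.range mat.length).map fun i =>
    (List.range mat.length).map fun j =>
      (R.getD i []).getD j false || ((R.getD i []).getD k false && (R.getD k []).getD j false)

def fwReach (mat : List (List Int)) : List (List Bool) :=
  (List.range mat.length).foldl (fwStep mat) (fwInit mat)

def transiente_alt (mat : List (List Int)) : List Int :=
  let R := fwReach mat
  ((List.range mat.length).filter fun i =>
      (List.range mat.length).any fun j =>
        decide (j ≠ i) && decide (0 < (mat.getD i []).getD j 0) &&
          !((R.getD j []).getD i false)).map
    fun i : Nat => (i : Int)

-- ===== PRECONDITION & SPEC =====
-- Pre_ excludes non-square matrices: on those A raises IndexError whenever its DFS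
-- reaches a short row, and otherwise returns a value only by accident of which
-- entries happen to be positive.
def Pre_transiente (mat : List (List Int)) : Prop := ∀ row ∈ mat, row.length = mat.length

instance (mat : List (List Int)) : Decidable (Pre_transiente mat) := by
  unfold Pre_transiente; infer_instance

def pvWitness_transiente : List (List Int) := [[0, 1], [0, 0]]

def Spec_transiente (mat : List (List Int)) (out : List Int) : Prop := out = transiente_alt mat
instance (mat : List (List Int)) (out : List Int) : Decidable (Spec_transiente mat out) := by
  unfold Spec_transiente; infer_instance

-- ===== CLAIM (what is proved, stated in full; the proofs are below) =====
def Claim_equal_transiente : Prop :=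
  ∀ (mat : List (List Int)), Dom_transiente mat → Pre_transiente mat →
    Spec_transiente mat (transiente mat)

-- ===== LEMMAS AND PROOFS =====

-- the edge relation of the graph: a positive entry inside the square matrix
def Edge (mat : List (List Int)) (a b : Nat) : Prop :=
  a < mat.length ∧ b < mat.length ∧ 0 < (mat.getD a []).getD b 0

-- paths of length ≥ 1 whose intermediate vertices are all < K
inductive Via (mat : List (List Int)) : Nat → Nat → Nat → Prop
  | base {K a b : Nat} : Edge mat a b → Via mat K a b
  | comp {K a b : Nat} (c : Nat) (hc : c < K) (h1 : Via mat K a c) (h2 : Via mat K c b) :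
      Via mat K a b

theorem via_mono {mat : List (List Int)} {K K' a b : Nat} (h : Via mat K a b) (hK : K ≤ K') :
    Via mat K' a b := by
  induction h with
  | base h => exact Via.base h
  | comp c hc _ _ ih1 ih2 => exact Via.comp c (Nat.lt_of_lt_of_le hc hK) ih1 ih2

theorem via_succ_iff {mat : List (List Int)} {K a b : Nat} :
    Via mat (K + 1) a b ↔ Via mat K a b ∨ (Via mat K a K ∧ Via mat K K b) := by
  constructor
  · intro h
    induction h with
    | base h => exact Or.inl (Via.base h)
    | comp c hc h1 h2 ih1 ih2 =>
      rcases Nat.lt_succ_iff_lt_or_eq.mp hc with hcK | rfl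
      · rcases ih1 with h1' | ⟨hak, hkc⟩ <;> rcases ih2 with h2' | ⟨hck, hkb⟩
        · exact Or.inl (Via.comp c hcK h1' h2')
        · exact Or.inr ⟨Via.comp c hcK h1' hck, hkb⟩
        · exact Or.inr ⟨hak, Via.comp c hcK hkc h2'⟩
        · exact Or.inr ⟨hak, hkb⟩
      · rcases ih1 with h1' | ⟨hak, _⟩ <;> rcases ih2 with h2' | ⟨_, hkb⟩
        · exact Or.inr ⟨h1', h2'⟩
        · exact Or.inr ⟨h1', hkb⟩
        · exact Or.inr ⟨hak, h2'⟩
        · exact Or.inr ⟨hak, hkb⟩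
  · rintro (h | ⟨h1, h2⟩)
    · exact via_mono h (Nat.le_succ K)
    · exact Via.comp K (Nat.lt_succ_self K)
        (via_mono h1 (Nat.le_succ K)) (via_mono h2 (Nat.le_succ K))

theorem via_iff_transGen {mat : List (List Int)} {a b : Nat} :
    Via mat mat.length a b ↔ Relation.TransGen (Edge mat) a b := by
  constructor
  · intro h
    induction h with
    | base h => exact Relation.TransGen.single h
    | comp c _ _ _ ih1 ih2 => exact Relation.TransGen.trans ih1 ih2
  · intro h
    induction h with
    | single h => exact Via.base h
    | tail _ h ih => exact Via.comp _ h.1 ih (Via.base h)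

theorem getD_map_range' {α : Type} (f : Nat → α) {n a : Nat} (d : α) (h : a < n) :
    ((List.range n).map f).getD a d = f a := by
  simp [List.getD_eq_getElem?_getD, List.getElem?_map, List.getElem?_range h]

theorem fwStep_get {mat : List (List Int)} {R : List (List Bool)} {k a b : Nat}
    (ha : a < mat.length) (hb : b < mat.length) :
    ((fwStep mat R k).getD a []).getD b false =
      ((R.getD a []).getD b false || ((R.getD a []).getD k false && (R.getD k []).getD b false)) := by
  unfold fwStep
  rw [getD_map_range' _ [] ha, getD_map_range' _ false hb]

theorem fwInit_get {mat : List (List Int)} {a b : Nat}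
    (ha : a < mat.length) (hb : b < mat.length) :
    ((fwInit mat).getD a []).getD b false = decide (0 < (mat.getD a []).getD b 0) := by
  unfold fwInit
  rw [getD_map_range' _ [] ha, getD_map_range' _ false hb]

theorem via_zero_iff {mat : List (List Int)} {a b : Nat} :
    Via mat 0 a b ↔ Edge mat a b := by
  constructor
  · intro h
    cases h with
    | base h => exact h
    | comp c hc _ _ => exact absurd hc (Nat.not_lt_zero c)
  · exact Via.base

theorem fw_fold_get (mat : List (List Int)) :
    ∀ (K : Nat), K ≤ mat.length → ∀ {a b : Nat}, a < mat.length → b < mat.length →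
      ((((List.range K).foldl (fwStep mat) (fwInit mat)).getD a []).getD b false = true ↔
        Via mat K a b) := by
  intro K
  induction K with
  | zero =>
    intro _ a b ha hb
    rw [List.range_zero, List.foldl_nil, fwInit_get ha hb, via_zero_iff]
    simp [Edge, ha, hb]
  | succ K ih =>
    intro hK a b ha hb
    have hKn : K < mat.length := Nat.lt_of_succ_le hK
    have hK' : K ≤ mat.length := Nat.le_of_lt hKn
    rw [List.range_succ, List.foldl_append, List.foldl_cons, List.foldl_nil,
      fwStep_get ha hb, via_succ_iff]
    rw [Bool.or_eq_true, Bool.and_eq_true, ih hK' ha hb, ih hK' ha hKn, ih hK' hKn hb]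

theorem fwReach_get {mat : List (List Int)} {a b : Nat}
    (ha : a < mat.length) (hb : b < mat.length) :
    (((fwReach mat).getD a []).getD b false = true ↔ Relation.TransGen (Edge mat) a b) := by
  rw [fwReach, fw_fold_get mat _ le_rfl ha hb, via_iff_transGen]

-- the loop body of the `for j in range(len(mat[start]))` fold inside funcAcc, by name
def accBody (mat : List (List Int)) (f s e : Nat) : (Int × List Nat) → Nat → Int × List Nat :=
  fun acc j =>
    if 0 < (mat.getD s []).getD j 0 then
      let r := funcAcc mat f acc.2 j e
      (acc.1 + r.1, r.2)
    else acc

theorem funcAcc_succ (mat : List (List Int)) (f : Nat) (visit : List Nat) (s e : Nat) :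
    funcAcc mat (f + 1) visit s e =
      if 0 < (mat.getD s []).getD e 0 then (1, visit)
      else if s ∈ visit then (0, visit)
      else (List.range (mat.getD s []).length).foldl (accBody mat f s e) (0, visit ++ [s]) :=
  rfl

theorem rowlen_eq {mat : List (List Int)} (hsq : ∀ row ∈ mat, row.length = mat.length)
    {s : Nat} (hs : s < mat.length) : (mat.getD s []).length = mat.length := by
  have : mat.getD s [] = mat[s] := List.getD_eq_getElem mat [] hs
  rw [this]
  exact hsq _ (List.getElem_mem hs)

theorem mem_of_nodup_length_ge {n : Nat} {l : List Nat} (hnd : l.Nodup)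
    (hb : ∀ v ∈ l, v < n) (hl : n ≤ l.length) {s : Nat} (hs : s < n) : s ∈ l := by
  have hsub : l.toFinset ⊆ Finset.range n := fun x hx =>
    Finset.mem_range.mpr (hb x (List.mem_toFinset.mp hx))
  have hcard : (Finset.range n).card ≤ l.toFinset.card := by
    rw [List.toFinset_card_of_nodup hnd, Finset.card_range]; exact hl
  have heq := Finset.eq_of_subset_of_card_le hsub hcard
  exact List.mem_toFinset.mp (heq ▸ Finset.mem_range.mpr hs)

-- ---------- DFS (func_acc) side ----------

theorem funcAcc_nonneg (mat : List (List Int)) :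
    ∀ (fuel : Nat) (visit : List Nat) (s e : Nat), 0 ≤ (funcAcc mat fuel visit s e).1 := by
  intro fuel
  induction fuel with
  | zero => intro visit s e; simp [funcAcc]
  | succ f ih =>
    intro visit s e
    rw [funcAcc_succ]
    split
    · norm_num
    · split
      · exact le_rfl
      · have H : ∀ (l : List Nat) (acc : Int × List Nat), 0 ≤ acc.1 →
            0 ≤ (l.foldl (accBody mat f s e) acc).1 := by
          intro l
          induction l with
          | nil => intro acc h; simpa using h
          | cons j t iht =>
            intro acc h
            rw [List.foldl_cons]
            by_cases hg : 0 < (mat.getD s []).getD j 0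
            · rw [accBody, if_pos hg]
              exact iht _ (Int.add_nonneg h (ih acc.2 j e))
            · rw [accBody, if_neg hg]
              exact iht _ h
        exact H _ _ le_rfl

theorem foldAcc_main (mat : List (List Int)) {e s f : Nat}
    (HIH : ∀ (visit : List Nat) (j : Nat), j < mat.length → visit.Nodup →
      (∀ v ∈ visit, v < mat.length) → mat.length - visit.length < f →
      (visit <+: (funcAcc mat f visit j e).2 ∧ (funcAcc mat f visit j e).2.Nodup ∧
        (∀ v ∈ (funcAcc mat f visit j e).2, v < mat.length)) ∧
      ((funcAcc mat f visit j e).1 = 0 →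
        j ∈ (funcAcc mat f visit j e).2 ∧
        ∀ v ∈ (funcAcc mat f visit j e).2, v ∉ visit →
          ¬ 0 < (mat.getD v []).getD e 0 ∧
          ∀ j', j' < mat.length → 0 < (mat.getD v []).getD j' 0 →
            j' ∈ (funcAcc mat f visit j e).2)) :
    ∀ (l : List Nat) (a : Int) (W : List Nat), (∀ j ∈ l, j < mat.length) → 0 ≤ a →
      W.Nodup → (∀ v ∈ W, v < mat.length) → mat.length - W.length < f →
      (W <+: (l.foldl (accBody mat f s e) (a, W)).2 ∧
        (l.foldl (accBody mat f s e) (a, W)).2.Nodup ∧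
        (∀ v ∈ (l.foldl (accBody mat f s e) (a, W)).2, v < mat.length) ∧
        a ≤ (l.foldl (accBody mat f s e) (a, W)).1) ∧
      ((l.foldl (accBody mat f s e) (a, W)).1 = 0 →
        a = 0 ∧
        (∀ j ∈ l, 0 < (mat.getD s []).getD j 0 → j ∈ (l.foldl (accBody mat f s e) (a, W)).2) ∧
        ∀ v ∈ (l.foldl (accBody mat f s e) (a, W)).2, v ∉ W →
          ¬ 0 < (mat.getD v []).getD e 0 ∧
          ∀ j', j' < mat.length → 0 < (mat.getD v []).getD j' 0 →
            j' ∈ (l.foldl (accBody mat f s e) (a, W)).2) := by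
  intro l
  induction l with
  | nil =>
    intro a W _ ha hnd hb _
    rw [List.foldl_nil]
    exact ⟨⟨List.prefix_refl _, hnd, hb, le_rfl⟩,
      fun h => ⟨h, fun j hj => absurd hj List.not_mem_nil, fun v hvW hW => absurd hvW hW⟩⟩
  | cons j t iht =>
    intro a W hl ha hnd hb hf
    rw [List.foldl_cons]
    by_cases hg : 0 < (mat.getD s []).getD j 0
    · simp only [accBody, if_pos hg]
      obtain ⟨⟨hpre1, hnd1, hb1⟩, hzero1⟩ := HIH W j (hl j List.mem_cons_self) hnd hb hf
      have hlen1 : W.length ≤ (funcAcc mat f W j e).2.length := hpre1.length_le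
      have hf1 : mat.length - (funcAcc mat f W j e).2.length < f := by omega
      have hr1 : 0 ≤ (funcAcc mat f W j e).1 := funcAcc_nonneg mat f W j e
      obtain ⟨⟨hpre2, hnd2, hb2, hle2⟩, hzero2⟩ :=
        iht (a + (funcAcc mat f W j e).1) (funcAcc mat f W j e).2
          (fun x hx => hl x (List.mem_cons_of_mem _ hx)) (by omega) hnd1 hb1 hf1
      refine ⟨⟨hpre1.trans hpre2, hnd2, hb2, by omega⟩, ?_⟩
      intro hz
      obtain ⟨haz, hjs, hcl⟩ := hzero2 hz
      have ha0 : a = 0 := by omega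
      have hr0 : (funcAcc mat f W j e).1 = 0 := by omega
      obtain ⟨hjmem, hclr⟩ := hzero1 hr0
      refine ⟨ha0, ?_, ?_⟩
      · intro j' hj' hgj'
        rcases List.mem_cons.mp hj' with rfl | hj't
        · exact hpre2.subset hjmem
        · exact hjs j' hj't hgj'
      · intro v hv hvW
        by_cases hvr : v ∈ (funcAcc mat f W j e).2
        · obtain ⟨hc1, hc2⟩ := hclr v hvr hvW
          exact ⟨hc1, fun j'' hj'' hg'' => hpre2.subset (hc2 j'' hj'' hg'')⟩
        · exact hcl v hv hvr
    · simp only [accBody, if_neg hg]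
      obtain ⟨hstr, hzero⟩ := iht a W (fun x hx => hl x (List.mem_cons_of_mem _ hx)) ha hnd hb hf
      refine ⟨hstr, ?_⟩
      intro hz
      obtain ⟨ha0, hjs, hcl⟩ := hzero hz
      refine ⟨ha0, ?_, hcl⟩
      intro j' hj' hgj'
      rcases List.mem_cons.mp hj' with rfl | hj't
      · exact absurd hgj' hg
      · exact hjs j' hj't hgj'

theorem funcAcc_main (mat : List (List Int)) (hsq : ∀ row ∈ mat, row.length = mat.length)
    {e : Nat} :
    ∀ (fuel : Nat) (visit : List Nat) (s : Nat), s < mat.length →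
      visit.Nodup → (∀ v ∈ visit, v < mat.length) → mat.length - visit.length < fuel →
      (visit <+: (funcAcc mat fuel visit s e).2 ∧
        (funcAcc mat fuel visit s e).2.Nodup ∧
        (∀ v ∈ (funcAcc mat fuel visit s e).2, v < mat.length)) ∧
      ((funcAcc mat fuel visit s e).1 = 0 →
        s ∈ (funcAcc mat fuel visit s e).2 ∧
        ∀ v ∈ (funcAcc mat fuel visit s e).2, v ∉ visit →
          ¬ 0 < (mat.getD v []).getD e 0 ∧
          ∀ j, j < mat.length → 0 < (mat.getD v []).getD j 0 →
            j ∈ (funcAcc mat fuel visit s e).2) := by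
  intro fuel
  induction fuel with
  | zero => intro visit s _ _ _ hf; exact absurd hf (Nat.not_lt_zero _)
  | succ f ih =>
    intro visit s hs hnd hb hf
    rw [funcAcc_succ]
    by_cases h1 : 0 < (mat.getD s []).getD e 0
    · rw [if_pos h1]
      refine ⟨⟨List.prefix_refl _, hnd, hb⟩, ?_⟩
      intro h; norm_num at h
    · rw [if_neg h1]
      by_cases h2 : s ∈ visit
      · rw [if_pos h2]
        exact ⟨⟨List.prefix_refl _, hnd, hb⟩, fun _ => ⟨h2, fun v hv hnv => absurd hv hnv⟩⟩
      · rw [if_neg h2]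
        have hlenv : visit.length < mat.length := by
          by_contra hge
          exact h2 (mem_of_nodup_length_ge hnd hb (Nat.le_of_not_lt hge) hs)
        have hfW : mat.length - (visit ++ [s]).length < f := by
          rw [List.length_append, List.length_singleton]; omega
        have hndW : (visit ++ [s]).Nodup := by
          rw [List.nodup_append]
          refine ⟨hnd, List.nodup_singleton s, ?_⟩
          intro x hx y hy
          rw [List.mem_singleton] at hy
          subst hy
          intro hxy
          exact h2 (hxy ▸ hx)
        have hbW : ∀ v ∈ visit ++ [s], v < mat.length := by
          intro v hv
          rcases List.mem_append.mp hv with h | h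
          · exact hb v h
          · rw [List.mem_singleton] at h; omega
        have hjlt : ∀ j ∈ List.range (mat.getD s []).length, j < mat.length := by
          intro j hj
          have := List.mem_range.mp hj
          rwa [rowlen_eq hsq hs] at this
        obtain ⟨⟨hpre, hndV, hbV, _⟩, hz⟩ :=
          foldAcc_main mat ih (List.range (mat.getD s []).length) 0 (visit ++ [s])
            hjlt le_rfl hndW hbW hfW
        refine ⟨⟨(List.prefix_append visit [s]).trans hpre, hndV, hbV⟩, ?_⟩
        intro h0
        obtain ⟨_, hsucc, hcl⟩ := hz h0
        have hsW : s ∈ (List.foldl (accBody mat f s e)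
            (0, visit ++ [s]) (List.range (mat.getD s []).length)).2 := by
          exact hpre.subset (by simp)
        refine ⟨hsW, ?_⟩
        intro v hv hvnot
        by_cases hvs : v = s
        · subst hvs
          refine ⟨h1, ?_⟩
          intro j hj hgj
          exact hsucc j (by rw [rowlen_eq hsq hs]; exact List.mem_range.mpr hj) hgj
        · refine hcl v hv ?_
          rw [List.mem_append, List.mem_singleton]
          rintro (h | h)
          · exact hvnot h
          · exact hvs h

theorem funcAcc_pos_reach (mat : List (List Int)) (hsq : ∀ row ∈ mat, row.length = mat.length)
    {e : Nat} (he : e < mat.length) :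
    ∀ (fuel : Nat) (visit : List Nat) (s : Nat), s < mat.length →
      0 < (funcAcc mat fuel visit s e).1 → Relation.TransGen (Edge mat) s e := by
  intro fuel
  induction fuel with
  | zero => intro visit s _ hpos; simp [funcAcc] at hpos
  | succ f ih =>
    intro visit s hs hpos
    rw [funcAcc_succ] at hpos
    by_cases h1 : 0 < (mat.getD s []).getD e 0
    · exact Relation.TransGen.single ⟨hs, he, h1⟩
    · rw [if_neg h1] at hpos
      by_cases h2 : s ∈ visit
      · rw [if_pos h2] at hpos; exact absurd hpos (lt_irrefl 0)
      · rw [if_neg h2] at hpos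
        have H : ∀ (l : List Nat) (a : Int) (W : List Nat), 0 ≤ a →
            0 < (l.foldl (accBody mat f s e) (a, W)).1 →
            0 < a ∨ ∃ j ∈ l, 0 < (mat.getD s []).getD j 0 ∧
              ∃ W', 0 < (funcAcc mat f W' j e).1 := by
          intro l
          induction l with
          | nil => intro a W _ h; rw [List.foldl_nil] at h; exact Or.inl h
          | cons j t iht =>
            intro a W ha h
            rw [List.foldl_cons] at h
            by_cases hg : 0 < (mat.getD s []).getD j 0
            · simp only [accBody, if_pos hg] at h
              have hr := funcAcc_nonneg mat f W j e
              rcases iht _ _ (by omega) h with hpos' | ⟨j', hj', hg', hW'⟩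
              · by_cases hr0 : 0 < (funcAcc mat f W j e).1
                · exact Or.inr ⟨j, List.mem_cons_self, hg, W, hr0⟩
                · exact Or.inl (by omega)
              · exact Or.inr ⟨j', List.mem_cons_of_mem _ hj', hg', hW'⟩
            · simp only [accBody, if_neg hg] at h
              rcases iht _ _ ha h with h' | ⟨j', hj', hg', hW'⟩
              · exact Or.inl h'
              · exact Or.inr ⟨j', List.mem_cons_of_mem _ hj', hg', hW'⟩
        rcases H _ _ _ le_rfl hpos with h0 | ⟨j, hj, hg, W', hW'⟩
        · exact absurd h0 (lt_irrefl 0)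
        · have hjn : j < mat.length := by
            have := List.mem_range.mp hj
            rwa [rowlen_eq hsq hs] at this
          exact Relation.TransGen.head ⟨hs, hjn, hg⟩ (ih W' j hjn hW')

theorem closed_no_reach {mat : List (List Int)} {e : Nat} {V : List Nat}
    (hcl : ∀ v ∈ V, ¬ 0 < (mat.getD v []).getD e 0 ∧
      ∀ j, j < mat.length → 0 < (mat.getD v []).getD j 0 → j ∈ V) :
    ∀ a ∈ V, ¬ Relation.TransGen (Edge mat) a e := by
  intro a haV h
  revert haV
  induction h using Relation.TransGen.head_induction_on with
  | single h => exact fun ha => (hcl _ ha).1 h.2.2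
  | head h _ ih => exact fun ha => ih ((hcl _ ha).2 _ h.2.1 h.2.2)

theorem funcAcc_zero_iff (mat : List (List Int)) (hsq : ∀ row ∈ mat, row.length = mat.length)
    {s e : Nat} (hs : s < mat.length) (he : e < mat.length) :
    ((funcAcc mat (mat.length + 1) [] s e).1 = 0 ↔ ¬ Relation.TransGen (Edge mat) s e) := by
  constructor
  · intro h0
    obtain ⟨_, hz⟩ := funcAcc_main mat hsq (mat.length + 1) [] s hs List.nodup_nil
      (by simp) (by omega)
    obtain ⟨hsV, hcl⟩ := hz h0
    exact closed_no_reach (fun v hv => hcl v hv List.not_mem_nil) s hsV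
  · intro hnr
    by_contra hne
    have hpos : 0 < (funcAcc mat (mat.length + 1) [] s e).1 :=
      lt_of_le_of_ne (funcAcc_nonneg mat _ [] s e) (Ne.symm hne)
    exact hnr (funcAcc_pos_reach mat hsq he _ [] s hs hpos)

-- the inner-loop body of transiente (port A), named for the assembly lemmas
def innerBody (mat : List (List Int)) (i : Nat) (out : List Int) (j : Nat) : List Int :=
  if i ≠ j ∧ 0 < (mat.getD i []).getD j 0 ∧ (funcAcc mat (mat.length + 1) [] j i).1 = 0 then
    if (i : Int) ∈ out then out else out ++ [(i : Int)]
  else out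

theorem inner_const (mat : List (List Int)) (i : Nat) :
    ∀ (l : List Nat) (out : List Int), (i : Int) ∈ out →
      l.foldl (innerBody mat i) out = out := by
  intro l
  induction l with
  | nil => intro out _; rfl
  | cons j t iht =>
    intro out hmem
    rw [List.foldl_cons]
    have hstep : innerBody mat i out j = out := by
      simp [innerBody, hmem]
    rw [hstep]
    exact iht out hmem

theorem inner_eq_pos (mat : List (List Int)) (i : Nat) :
    ∀ (l : List Nat) (out : List Int),
      (∃ j ∈ l, i ≠ j ∧ 0 < (mat.getD i []).getD j 0 ∧
        (funcAcc mat (mat.length + 1) [] j i).1 = 0) →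
      l.foldl (innerBody mat i) out =
        if (i : Int) ∈ out then out else out ++ [(i : Int)] := by
  intro l
  induction l with
  | nil =>
    rintro out ⟨j, hj, _⟩
    exact absurd hj List.not_mem_nil
  | cons j t iht =>
    intro out hex
    rw [List.foldl_cons]
    by_cases hC : i ≠ j ∧ 0 < (mat.getD i []).getD j 0 ∧
        (funcAcc mat (mat.length + 1) [] j i).1 = 0
    · have hstep : innerBody mat i out j =
          if (i : Int) ∈ out then out else out ++ [(i : Int)] := by
        unfold innerBody; rw [if_pos hC]
      rw [hstep]
      have hmem : (i : Int) ∈ (if (i : Int) ∈ out then out else out ++ [(i : Int)]) := by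
        split
        · assumption
        · exact List.mem_append_right _ (List.mem_singleton_self _)
      exact inner_const mat i t _ hmem
    · have hstep : innerBody mat i out j = out := by
        unfold innerBody; rw [if_neg hC]
      rw [hstep]
      apply iht
      rcases hex with ⟨j', hj', hC'⟩
      rcases List.mem_cons.mp hj' with rfl | hj't
      · exact absurd hC' hC
      · exact ⟨j', hj't, hC'⟩

theorem inner_eq_neg (mat : List (List Int)) (i : Nat) :
    ∀ (l : List Nat) (out : List Int),
      (∀ j ∈ l, ¬ (i ≠ j ∧ 0 < (mat.getD i []).getD j 0 ∧
        (funcAcc mat (mat.length + 1) [] j i).1 = 0)) →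
      l.foldl (innerBody mat i) out = out := by
  intro l
  induction l with
  | nil => intro out _; rfl
  | cons j t iht =>
    intro out hall
    rw [List.foldl_cons]
    have hstep : innerBody mat i out j = out := by
      unfold innerBody; rw [if_neg (hall j List.mem_cons_self)]
    rw [hstep]
    exact iht out (fun j' hj' => hall j' (List.mem_cons_of_mem _ hj'))

theorem cond_iff (mat : List (List Int)) (hsq : ∀ row ∈ mat, row.length = mat.length)
    {i : Nat} (hi : i < mat.length) :
    (∃ j ∈ List.range ((mat.getD i []).length), i ≠ j ∧ 0 < (mat.getD i []).getD j 0 ∧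
        (funcAcc mat (mat.length + 1) [] j i).1 = 0) ↔
      ((List.range mat.length).any fun j =>
        decide (j ≠ i) && decide (0 < (mat.getD i []).getD j 0) &&
          !(((fwReach mat).getD j []).getD i false)) = true := by
  rw [rowlen_eq hsq hi, List.any_eq_true]
  constructor
  · rintro ⟨j, hj, hne, hg, hz⟩
    have hjn := List.mem_range.mp hj
    refine ⟨j, hj, ?_⟩
    simp only [Bool.and_eq_true, decide_eq_true_eq, Bool.not_eq_true']
    refine ⟨⟨Ne.symm hne, hg⟩, ?_⟩
    have hnr := (funcAcc_zero_iff mat hsq hjn hi).mp hz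
    cases hbool : ((fwReach mat).getD j []).getD i false
    · rfl
    · exact absurd ((fwReach_get hjn hi).mp hbool) hnr
  · rintro ⟨j, hj, hb⟩
    have hjn := List.mem_range.mp hj
    simp only [Bool.and_eq_true, decide_eq_true_eq, Bool.not_eq_true'] at hb
    obtain ⟨⟨hne, hg⟩, hfalse⟩ := hb
    refine ⟨j, hj, Ne.symm hne, hg, ?_⟩
    rw [funcAcc_zero_iff mat hsq hjn hi]
    intro hreach
    rw [(fwReach_get hjn hi).mpr hreach] at hfalse
    cases hfalse

theorem cast_not_mem {K : Nat} {l : List Nat} (h : ∀ x ∈ l, x < K) :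
    (K : Int) ∉ l.map (fun i : Nat => (i : Int)) := by
  intro hmem
  rcases List.mem_map.mp hmem with ⟨x, hx, hcast⟩
  have hlt := h x hx
  have hxK : x = K := by exact_mod_cast hcast
  omega

theorem outer_eq (mat : List (List Int)) (hsq : ∀ row ∈ mat, row.length = mat.length) :
    ∀ K, K ≤ mat.length →
      (List.range K).foldl
        (fun out i => (List.range ((mat.getD i []).length)).foldl (innerBody mat i) out) [] =
      ((List.range K).filter fun i =>
        (List.range mat.length).any fun j =>
          decide (j ≠ i) && decide (0 < (mat.getD i []).getD j 0) &&
            !(((fwReach mat).getD j []).getD i false)).map (fun i : Nat => (i : Int)) := by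
  intro K
  induction K with
  | zero => intro _; rfl
  | succ K ihK =>
    intro hK
    have hKn : K < mat.length := hK
    simp only [List.range_succ, List.foldl_append, List.filter_append, List.map_append,
      List.foldl_cons, List.foldl_nil]
    rw [ihK (le_of_lt hKn)]
    by_cases hex : ∃ j ∈ List.range ((mat.getD K []).length),
        K ≠ j ∧ 0 < (mat.getD K []).getD j 0 ∧ (funcAcc mat (mat.length + 1) [] j K).1 = 0
    · rw [inner_eq_pos mat K _ _ hex]
      have hp := (cond_iff mat hsq hKn).mp hex
      have hnm : (K : Int) ∉ ((List.range K).filter fun i =>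
          (List.range mat.length).any fun j =>
            decide (j ≠ i) && decide (0 < (mat.getD i []).getD j 0) &&
              !(((fwReach mat).getD j []).getD i false)).map (fun i : Nat => (i : Int)) :=
        cast_not_mem (fun x hx => List.mem_range.mp (List.mem_filter.mp hx).1)
      rw [if_neg hnm]
      simp only [List.filter_cons, List.filter_nil, hp]
      simp
    · have hall : ∀ j ∈ List.range ((mat.getD K []).length),
          ¬ (K ≠ j ∧ 0 < (mat.getD K []).getD j 0 ∧
            (funcAcc mat (mat.length + 1) [] j K).1 = 0) := by
        intro j hj hC
        exact hex ⟨j, hj, hC⟩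
      rw [inner_eq_neg mat K _ _ hall]
      have hp : ((List.range mat.length).any fun j =>
          decide (j ≠ K) && decide (0 < (mat.getD K []).getD j 0) &&
            !(((fwReach mat).getD j []).getD K false)) = false := by
        cases hb : (List.range mat.length).any fun j =>
            decide (j ≠ K) && decide (0 < (mat.getD K []).getD j 0) &&
              !(((fwReach mat).getD j []).getD K false)
        · rfl
        · exact absurd ((cond_iff mat hsq hKn).mpr hb) hex
      simp only [List.filter_cons, List.filter_nil, hp]
      simp

-- ===== VERDICT (by name: the statement is the Claim_ definition above) =====
theorem transiente_spec : Claim_equal_transiente := by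
  intro mat _ hpre
  unfold Spec_transiente
  exact outer_eq mat hpre mat.length le_rfl
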